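-- pv_equiv track=rewrite | github.com/ybakyurek/BBM103-AS4-maze | maze.py | find_point_position
-- ===== SOURCE A (Python) =====
-- def find_point_position(maze, point):
--     coordinate = {"row": 0, "col": 0}
--     for i, row in enumerate(maze):
--         for j, item in enumerate(row):
--             if item == point:
--                 coordinate["row"] = i
--                 coordinate["col"] = j
--     return coordinate
-- ===== SOURCE B (Python) =====
-- def find_point_position(maze, point):
--     for i, row in reversed(list(enumerate(maze))):
--         for j, item in reversed(list(enumerate(row))):
--             if item == point:
--                 return {"row": i, "col": j}
--     return {"row": 0, "col": 0}
-- ===== Notes on version B (the rewrite author's own statement) =====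
-- stated objective: alternative
-- what changed: B scans the grid in reverse (bottom-right to top-left) and returns at the first match, instead of A's full forward sweep that keeps overwriting a dict; the not-found default is the same.
import Mathlib
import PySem

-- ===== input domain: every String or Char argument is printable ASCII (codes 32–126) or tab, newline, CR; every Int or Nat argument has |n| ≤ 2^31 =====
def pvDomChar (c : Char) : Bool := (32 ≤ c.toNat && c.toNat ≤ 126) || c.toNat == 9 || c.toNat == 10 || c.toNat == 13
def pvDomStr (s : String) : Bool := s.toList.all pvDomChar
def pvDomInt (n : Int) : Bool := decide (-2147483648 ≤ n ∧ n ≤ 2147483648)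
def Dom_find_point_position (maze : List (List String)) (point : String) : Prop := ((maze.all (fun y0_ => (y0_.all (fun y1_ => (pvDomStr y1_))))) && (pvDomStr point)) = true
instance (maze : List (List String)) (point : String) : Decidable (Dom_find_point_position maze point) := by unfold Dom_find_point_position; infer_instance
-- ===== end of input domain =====

-- B scans the grid in reverse and returns at the first (= last forward) match; same default when absent.

-- ===== PORT A =====
def find_point_position (maze : List (List String)) (point : String) : List (String × Int) :=
  let coordinate : PySem.Dict String Int := PySem.Dict.ofList [("row", 0), ("col", 0)]
  let coordinate :=
    (PySem.List.enumerate maze).foldl (fun d p =>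
      (PySem.List.enumerate p.2).foldl (fun d q =>
        if q.2 == point then (d.insert "row" p.1).insert "col" q.1 else d) d) coordinate
  coordinate.items

-- ===== PORT B =====
def fppRowScan (point : String) : List (Int × String) → Option Int
  | [] => none
  | (j, item) :: rest => if item == point then some j else fppRowScan point rest

def fppMazeScan (point : String) : List (Int × List String) → Option (Int × Int)
  | [] => none
  | (i, row) :: rest =>
    match fppRowScan point (PySem.List.enumerate row).reverse with
    | some j => some (i, j)
    | none => fppMazeScan point rest

def find_point_position_alt (maze : List (List String)) (point : String) : List (String × Int) :=
  match fppMazeScan point (PySem.List.enumerate maze).reverse with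
  | some (i, j) => [("row", i), ("col", j)]
  | none => [("row", 0), ("col", 0)]

-- ===== PRECONDITION & SPEC =====
def Spec_find_point_position (maze : List (List String)) (point : String) (out : List (String × Int)) : Prop := out = find_point_position_alt maze point
instance (maze : List (List String)) (point : String) (out : List (String × Int)) : Decidable (Spec_find_point_position maze point out) := by unfold Spec_find_point_position; infer_instance

-- ===== CLAIM (what is proved, stated in full; the proofs are below) =====
def Claim_equal_find_point_position : Prop := ∀ (maze : List (List String)) (point : String), Dom_find_point_position maze point → Spec_find_point_position maze point (find_point_position maze point)

-- ===== LEMMAS AND PROOFS =====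

-- two overwriting inserts on the two-key dict replace both values
lemma fpp_insert_pair (a b i j : Int) :
    ((PySem.Dict.ofList [("row", a), ("col", b)] : PySem.Dict String Int).insert "row" i).insert "col" j
      = PySem.Dict.ofList [("row", i), ("col", j)] := by
  rfl

-- B's row scan is find? on the reversed enumeration
lemma fpp_rowScan_eq (point : String) (l : List (Int × String)) :
    fppRowScan point l = (l.find? (fun q => q.2 == point)).map Prod.fst := by
  induction l with
  | nil => rfl
  | cons q rest ih =>
    cases q with
    | mk j item =>
      by_cases h : item == point
      · simp [fppRowScan, List.find?, h]
      · simp [fppRowScan, List.find?, h, ih]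

-- A's inner loop on the two-key dict, as a fold on the coordinate pair
lemma fpp_inner (point : String) (i : Int) (l : List (Int × String)) (a b : Int) :
    l.foldl (fun d q => if q.2 == point then (d.insert "row" i).insert "col" q.1 else d)
        (PySem.Dict.ofList [("row", a), ("col", b)])
      = PySem.Dict.ofList
          (match l.reverse.find? (fun q => q.2 == point) with
           | some q => [("row", i), ("col", q.1)]
           | none => [("row", a), ("col", b)]) := by
  induction l generalizing a b with
  | nil => rfl
  | cons q rest ih =>
    cases q with
    | mk j item =>
      simp only [List.foldl_cons, List.reverse_cons, List.find?_append]
      by_cases h : item == point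
      · rw [if_pos h, fpp_insert_pair, ih]
        cases hf : rest.reverse.find? (fun q => q.2 == point) with
        | some y => simp
        | none => simp [List.find?, h]
      · rw [if_neg h, ih]
        cases hf : rest.reverse.find? (fun q => q.2 == point) with
        | some y => simp
        | none => simp [List.find?, h]

-- B's maze scan picks the first row (in the given order) containing a match
lemma fpp_mazeScan_eq (point : String) (m : List (Int × List String)) :
    fppMazeScan point m =
      (m.find? (fun p => ((PySem.List.enumerate p.2).reverse.find? (fun q => q.2 == point)).isSome)).map
        (fun p => (p.1, (((PySem.List.enumerate p.2).reverse.find? (fun q => q.2 == point)).map Prod.fst).getD 0)) := by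
  induction m with
  | nil => rfl
  | cons p rest ih =>
    cases p with
    | mk i row =>
      simp only [fppMazeScan, fpp_rowScan_eq, List.find?]
      cases h : (PySem.List.enumerate row).reverse.find? (fun q => q.2 == point) with
      | some q => simp [h]
      | none => simp [ih]

-- A's outer loop on the two-key dict: the last row with a match wins
lemma fpp_outer (point : String) (m : List (Int × List String)) (a b : Int) :
    m.foldl (fun d p =>
        (PySem.List.enumerate p.2).foldl (fun d q =>
          if q.2 == point then (d.insert "row" p.1).insert "col" q.1 else d) d)
        (PySem.Dict.ofList [("row", a), ("col", b)])
      = PySem.Dict.ofList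
          (match m.reverse.find?
              (fun p => ((PySem.List.enumerate p.2).reverse.find? (fun q => q.2 == point)).isSome) with
           | some p => [("row", p.1),
               ("col", (((PySem.List.enumerate p.2).reverse.find? (fun q => q.2 == point)).map Prod.fst).getD 0)]
           | none => [("row", a), ("col", b)]) := by
  induction m generalizing a b with
  | nil => rfl
  | cons p rest ih =>
    cases p with
    | mk i row =>
      simp only [List.foldl_cons, List.reverse_cons, List.find?_append]
      rw [fpp_inner]
      cases hr : (PySem.List.enumerate row).reverse.find? (fun q => q.2 == point) with
      | some q =>
        rw [ih]
        cases hf : rest.reverse.find?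
            (fun p => ((PySem.List.enumerate p.2).reverse.find? (fun q => q.2 == point)).isSome) with
        | some y => simp
        | none => simp [List.find?, hr]
      | none =>
        rw [ih]
        cases hf : rest.reverse.find?
            (fun p => ((PySem.List.enumerate p.2).reverse.find? (fun q => q.2 == point)).isSome) with
        | some y => simp
        | none => simp [List.find?, hr]

-- ===== VERDICT (by name: the statement is the Claim_ definition above) =====
theorem find_point_position_spec : Claim_equal_find_point_position := by
  intro maze point _
  show find_point_position maze point = find_point_position_alt maze point
  unfold find_point_position find_point_position_alt
  simp only [fpp_outer, fpp_mazeScan_eq]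

  cases h : (PySem.List.enumerate maze).reverse.find?
      (fun p => ((PySem.List.enumerate p.2).reverse.find? (fun q => q.2 == point)).isSome) with
  | some p => rfl
  | none => rfl
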